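-- pv_equiv track=rewrite | github.com/manwar/perlweeklychallenge-club | challenge-229/roger-bell-west/python/ch-1.py | lexicographic
-- ===== SOURCE A (Python) =====
-- def lexicographic(a):
--   t = 0
--   for st in a:
--     q = list(st)
--     q.sort()
--     if "".join(q) == st:
--       continue
--     q.reverse()
--     if "".join(q) == st:
--       continue
--     t += 1
--   return t
-- ===== SOURCE B (Python) =====
-- def lexicographic(a):
--   t = 0
--   for st in a:
--     asc = all(x <= y for x, y in zip(st, st[1:]))
--     desc = all(x >= y for x, y in zip(st, st[1:]))
--     if not (asc or desc):
--       t += 1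
--   return t
-- ===== Notes on version B (the rewrite author's own statement) =====
-- stated objective: alternative
-- what changed: Instead of sorting each string's characters and comparing the sorted (and reversed-sorted) copy with the original, B makes one linear pass over adjacent character pairs checking non-decreasing / non-increasing order.
import Mathlib
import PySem

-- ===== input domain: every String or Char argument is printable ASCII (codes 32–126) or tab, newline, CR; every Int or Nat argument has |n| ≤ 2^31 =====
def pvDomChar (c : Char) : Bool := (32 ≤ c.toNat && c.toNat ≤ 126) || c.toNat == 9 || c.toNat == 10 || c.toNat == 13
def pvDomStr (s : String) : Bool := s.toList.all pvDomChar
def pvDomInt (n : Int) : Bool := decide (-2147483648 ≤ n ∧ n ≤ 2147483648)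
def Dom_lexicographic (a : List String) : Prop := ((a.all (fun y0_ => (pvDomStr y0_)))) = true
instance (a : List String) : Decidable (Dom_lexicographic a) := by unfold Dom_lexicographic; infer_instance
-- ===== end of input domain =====

-- B replaces per-string sorting with a linear adjacent-pair monotonicity check (equal return values, proved below).
-- ===== PORT A =====
def lexicographic (a : List String) : Int :=
  a.foldl (fun t st =>
    let q := PySem.List.sorted st.toList (fun x => x) false
    if String.ofList q = st then t
    else if String.ofList q.reverse = st then t
    else t + 1) 0

-- ===== PORT B =====
-- all(x <= y for x, y in zip(st, st[1:])): adjacent-pair scan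
def chainLe : List Char → Bool
  | [] => true
  | [_] => true
  | x :: y :: r => (x ≤ y) && chainLe (y :: r)

def chainGe : List Char → Bool
  | [] => true
  | [_] => true
  | x :: y :: r => (y ≤ x) && chainGe (y :: r)

def lexicographic_alt (a : List String) : Int :=
  a.foldl (fun t st =>
    if chainLe st.toList || chainGe st.toList then t else t + 1) 0

-- ===== PRECONDITION & SPEC =====
def Spec_lexicographic (a : List String) (out : Int) : Prop := out = lexicographic_alt a
instance (a : List String) (out : Int) : Decidable (Spec_lexicographic a out) := by unfold Spec_lexicographic; infer_instance

-- ===== CLAIM (what is proved, stated in full; the proofs are below) =====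
def Claim_equal_lexicographic : Prop := ∀ (a : List String), Dom_lexicographic a → Spec_lexicographic a (lexicographic a)

-- ===== LEMMAS AND PROOFS =====

theorem chainLe_iff_pairwise : ∀ (l : List Char), chainLe l = true ↔ l.Pairwise (· ≤ ·)
  | [] => by simp [chainLe]
  | [x] => by simp [chainLe]
  | x :: y :: r => by
    rw [chainLe]
    simp only [Bool.and_eq_true, decide_eq_true_eq, chainLe_iff_pairwise (y :: r)]
    constructor
    · rintro ⟨hxy, hp⟩
      rw [List.pairwise_cons]
      refine ⟨?_, hp⟩
      intro z hz
      rcases List.mem_cons.mp hz with rfl | hz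
      · exact hxy
      · exact le_trans hxy ((List.pairwise_cons.mp hp).1 z hz)
    · intro hp
      exact ⟨(List.pairwise_cons.mp hp).1 y List.mem_cons_self, hp.of_cons⟩

theorem chainGe_iff_pairwise : ∀ (l : List Char), chainGe l = true ↔ l.Pairwise (fun a b => b ≤ a)
  | [] => by simp [chainGe]
  | [x] => by simp [chainGe]
  | x :: y :: r => by
    rw [chainGe]
    simp only [Bool.and_eq_true, decide_eq_true_eq, chainGe_iff_pairwise (y :: r)]
    constructor
    · rintro ⟨hxy, hp⟩
      rw [List.pairwise_cons]
      refine ⟨?_, hp⟩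
      intro z hz
      rcases List.mem_cons.mp hz with rfl | hz
      · exact hxy
      · exact le_trans ((List.pairwise_cons.mp hp).1 z hz) hxy
    · intro hp
      exact ⟨(List.pairwise_cons.mp hp).1 y List.mem_cons_self, hp.of_cons⟩

theorem sorted_eq_iff_chainLe (l : List Char) :
    (PySem.List.sorted l (fun x => x) false = l) ↔ chainLe l = true := by
  rw [chainLe_iff_pairwise]
  constructor
  · intro h
    have := PySem.List.sorted_pairwise l (fun x => x)
    rwa [h] at this
  · intro h
    exact PySem.List.sorted_eq_self_of_pairwise l (fun x => x) h

theorem sorted_reverse_eq_iff_chainGe (l : List Char) :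
    ((PySem.List.sorted l (fun x => x) false).reverse = l) ↔ chainGe l = true := by
  rw [chainGe_iff_pairwise]
  constructor
  · intro h
    have hp := PySem.List.sorted_pairwise l (fun x => x)
    have : l.reverse.Pairwise (fun a b : Char => a ≤ b) := by
      rw [← h, List.reverse_reverse]
      exact hp
    rw [List.pairwise_reverse] at this
    exact this
  · intro h
    have hperm : l.reverse.Perm l := List.reverse_perm l
    have hpw : l.reverse.Pairwise (fun a b : Char => a ≤ b) := by
      rw [List.pairwise_reverse]; exact h
    have := PySem.List.sorted_id_eq_of_perm_of_pairwise _ _ hperm hpw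
    rw [this, List.reverse_reverse]

theorem step_eq (t : Int) (st : String) :
    (let q := PySem.List.sorted st.toList (fun x => x) false
     if String.ofList q = st then t
     else if String.ofList q.reverse = st then t
     else t + 1) =
    (if chainLe st.toList || chainGe st.toList then t else t + 1) := by
  have hmk : ∀ (cs : List Char), (String.ofList cs = st) ↔ cs = st.toList := by
    intro cs
    constructor
    · intro h; rw [← h]; simp
    · intro h; rw [h]; simp
  simp only [hmk]
  by_cases h1 : PySem.List.sorted st.toList (fun x => x) false = st.toList
  · have := (sorted_eq_iff_chainLe st.toList).mp h1
    simp [h1, this]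
  · have hc1 : chainLe st.toList = false := by
      rw [← Bool.not_eq_true, ← sorted_eq_iff_chainLe]; exact h1
    by_cases h2 : (PySem.List.sorted st.toList (fun x => x) false).reverse = st.toList
    · have := (sorted_reverse_eq_iff_chainGe st.toList).mp h2
      simp [h1, h2, this]
    · have hc2 : chainGe st.toList = false := by
        rw [← Bool.not_eq_true, ← sorted_reverse_eq_iff_chainGe]; exact h2
      simp [h1, h2, hc1, hc2]

-- ===== VERDICT (by name: the statement is the Claim_ definition above) =====
theorem lexicographic_spec : Claim_equal_lexicographic := by
  intro a _
  unfold Spec_lexicographic lexicographic lexicographic_alt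
  congr 1
  funext t st
  exact step_eq t st
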